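/- GENERATED by mk_final_copies.py from the proof of the farm's unit `start_decoder.C11e` (farm:start_decoder.C11e.1: Lemmas.lean) as the
   re-elaboration sweep compiled it — do not edit. -/
import Asan.CheckWalk
import Vorbis.Spec.Reader
import Vorbis.Spec.StartDecoderC4
import Vorbis.Spec.StartDecoderC7
import Vorbis.Spec.Units.start_decoder_C11e

/-!
  The unit `start_decoder.C11e` (0x114c6f … 0x114c9f with the stubs 0x114d58 … 0x114d6a and 0x114d6f … 0x114d81; stb_vorbis_fixed.c
  3889 – 3892: `if (c->lookup_values == 0) return error(f, VORBIS_invalid_setup); mults = setup_temp_malloc(f, 2·LV);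
  if (mults == NULL) return error(f, VORBIS_outofmem); j = 0`).

      In156 / At156      the intermediate assertion at `cut156` = 0x114c91 (the return of setup_temp_malloc), both arms
      c11e_temp_pre      setup_temp_malloc's precondition at 0x114c8c
      c11e_call_same     the push + the callee's footprint as ONE footprint of `AllocWin` windows
      c11e_alloc_ok      a whole `call setup_temp_malloc` that fits      (`Cur.free` with the ghost `(A.1.pushTemp n, …)`)
      c11e_alloc_fail    … that does not fit                              (`Cur.free` with the same ghost)
      c11e_build156      PURE: `In156` from `In11V` and what the two lemmas above return
      c11e_err_exit      PURE: `AtERR` from `Frame`, `Cur`, K1 – K5 and one footprint of quiet windows, `rax = 0`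
      c11e_two_lv        the bit fact `lea esi,[rax+rax]` = 2·LV
      c11e_fields_off / c11e_fields_quiet   `value_bits`, `lookup_type`, `lookup_values` over a footprint off `[c+16, c+32)`
      c11e_walk1         0x114c6f → `cut156` ∨ ERR (stub 0x114d58)
      c11e_walk2         `cut156` → `loop11` with `j = 0` ∨ ERR (stub 0x114d6f)
-/

open X86 X86.User Asan Vorbis Vorbis.Spec Vorbis.Spec.StartDecoder

set_option maxRecDepth 100000
set_option maxHeartbeats 4000000

namespace Vorbis.Spec.start_decoder_C11e

/-- **The assertion at `cut156` = 0x114c91** (`mov [rsp+28H],rax`: the return of `setup_temp_malloc(f, 2·LV)`), for the ghost `A` of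
AFTER the call: the clauses of `In11V` but `noTemps`, + `1 ≤ LV` (the `je` of 0x114c7e was not taken), + the result: `rax = 0` (the
request did not fit) or `rax` = the temp block P4 = (mults, 2·LV), the only temp block. -/
structure In156 (u₀ : State) (g : Ghost) (i : Nat) (A2 A3 Ai : Arena) (A : Arena × List Obj) (v : State) : Prop where
  frame : Frame u₀ g L.start_decoder.cut156 A v
  cur : Cur g i A2 A3 Ai A v
  k : K15 (Since Ai A.1) v.mem (g.cb v.mem i)
  type_12 : Codebook.lookup_type v.mem (g.cb v.mem i) = 1 ∨ Codebook.lookup_type v.mem (g.cb v.mem i) = 2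
  prod_le : Codebook.entries v.mem (g.cb v.mem i) * Codebook.dimensions v.mem (g.cb v.mem i) ≤ 0x1FFFFFFF
  mu0 : Codebook.multiplicands v.mem (g.cb v.mem i) = 0
  vb : 1 ≤ Codebook.value_bits v.mem (g.cb v.mem i) ∧ Codebook.value_bits v.mem (g.cb v.mem i) ≤ 16
  type1_lv : Codebook.lookup_type v.mem (g.cb v.mem i) = 1 →
    (Codebook.lookup_values v.mem (g.cb v.mem i) : Int) ≤ Codebook.entries v.mem (g.cb v.mem i)
  type2_lv : Codebook.lookup_type v.mem (g.cb v.mem i) = 2 →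
    (Codebook.lookup_values v.mem (g.cb v.mem i) : Int) =
      Codebook.entries v.mem (g.cb v.mem i) * Codebook.dimensions v.mem (g.cb v.mem i)
  lv_lt : Codebook.lookup_values v.mem (g.cb v.mem i) < 2 ^ 30
  lv_pos : 1 ≤ Codebook.lookup_values v.mem (g.cb v.mem i)
  /-- the result of setup_temp_malloc -/
  res : v.reg .rax = 0 ∨
    ((v.reg .rax).toNat ≠ 0 ∧
      TempsAre A.1 [((v.reg .rax).toNat, 2 * Codebook.lookup_values v.mem (g.cb v.mem i))])

/-- `At156`: `In156` for some ghost arena and ghost snapshots. -/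
def At156 (u₀ : State) (g : Ghost) (i : Nat) (v : State) : Prop :=
  ∃ (A : Arena × List Obj) (A2 A3 Ai : Arena), In156 u₀ g i A2 A3 Ai A v

/-- **Where `*f` is** (a stack object of stb_vorbis_open_memory, or an object of `A.2`): in the data space. -/
theorem c11e_obj_where {g : Ghost} {i : Nat} {A2 A3 Ai : Arena} {A : Arena × List Obj} {v : State} (h : Cur g i A2 A3 Ai A v)
    (hsh : ShadowInv A.2 g.frames' g.R v.mem) (hoff : ∀ o, o ∈ A.2 → L.textHi ≤ o.base) :
    0x119d40 ≤ g.f ∧ g.f + 1808 ≤ 0xC00000 ∧ (g.R ≤ g.f ∨ g.f + 1808 ≤ 0x700000 ∨ 0x800000 ≤ g.f) := by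
  have hl : LiveIn A.2 g.frames' g.f Off.sizeof.stb_vorbis := by
    apply h.hand.obj.mono
    intro o ho
    unfold Ghost.frames'
    rw [stackObjs_cons]
    rcases List.mem_append.mp ho with hs | ho'
    · exact List.mem_append_left _ (List.mem_append_right _ hs)
    · exact List.mem_append_right _ ho'
  have hw := hl.where_ hsh hoff (by simp only [voff]; omega)
  simp only [voff] at hw
  exact hw

/-- **`*f` is a live range for the callees of the function's body** (`error`'s precondition OB1): over the object list with the own
protected frame's objects in front. -/
theorem c11e_obj_live {g : Ghost} {A : Arena × List Obj} (hh : g.Hand A) :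
    LiveIn A.2 g.frames' g.f Off.sizeof.stb_vorbis := by
  apply hh.obj.mono
  intro o ho
  unfold Ghost.frames'
  rw [stackObjs_cons]
  rcases List.mem_append.mp ho with hs | ho'
  · exact List.mem_append_left _ (List.mem_append_right _ hs)
  · exact List.mem_append_right _ ho'

/-- **`setup_temp_malloc`'s precondition at 0x114c8c**: the state `s` at the callee's entry has the memory of the cut point but for the
pushed return address below `R` (`hmem`), `rsp = R − 8`, `rdi = f`. -/
theorem c11e_temp_pre {u₀ : State} {g : Ghost} {i : Nat} {A2 A3 Ai : Arena} {A : Arena × List Obj} {pc : Word} {v s : State}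
    (hfr : Frame u₀ g pc A v) (hcur : Cur g i A2 A3 Ai A v) (hun : ShadowUntouched v.mem s.mem)
    (hmem : Mem.EqOn (g.f + 112) (g.f + 136) v.mem s.mem) (hrsp : (s.reg .rsp).toNat + 8 = g.R)
    (hrdi : (s.reg .rdi).toNat = g.f) : (setup_temp_malloc.spec A.2 g.frames' A.1).pre s := by
  have hob := hcur.sd.bits.OB1
  obtain ⟨hf1, hf2, _⟩ := c11e_obj_where hcur hfr.shadow hfr.offText
  refine ⟨⟨?_, hfr.offText⟩, ?_, ?_, hcur.hand.arenaText⟩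
  · rw [hrsp]
    exact hfr.shadow.untouched hun
  · rw [hrdi]
    exact hcur.sd.env.live _ hob
  · rw [hrdi]
    apply hcur.sd.arena.frame (by simp only [voff]; omega)
    simp only [voff]
    exact hmem

/-- **`error`'s precondition at a stub of the segment**: the state `s` at the callee's entry (the return address pushed below `R`),
`rdi = f`, no store since the cut point `v` went to the shadow. -/
theorem c11e_error_pre {u₀ : State} {g : Ghost} {A : Arena × List Obj} {pc : Word} {v s : State}
    (hfr : Frame u₀ g pc A v) (hh : g.Hand A) (hun : ShadowUntouched v.mem s.mem)
    (hrsp : (s.reg .rsp).toNat + 8 = g.R) (hrdi : (s.reg .rdi).toNat = g.f) :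
    (error.spec A.2 g.frames').pre s := by
  refine ⟨⟨?_, hfr.offText⟩, ?_⟩
  · rw [hrsp]
    exact hfr.shadow.untouched hun
  · rw [hrdi]
    exact c11e_obj_live hh

/-- **The shadow window of `setup_temp_malloc`'s footprint is a window of the arena's shadow** (the fourth alternative of
`AllocWin`), when the request fits: the new block `[B + T', B + T' + n)`, `T' = T − (r8 n + 32) ≥ S`, lies in the buffer. -/
theorem c11e_shadow_win {A : Arena} {others : List Obj} {m : Mem} {f n : Nat} (ha : ArenaOK A others m f) (hfit : A.Fits n) :
    0xC00000 + A.B / 8 ≤ (shadowSpan (A.B + (A.T - (r8 n + 32))) (A.B + (A.T - (r8 n + 32)) + n)).lo ∧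
      (shadowSpan (A.B + (A.T - (r8 n + 32))) (A.B + (A.T - (r8 n + 32)) + n)).hi ≤ 0xC00000 + (A.B + A.L + 7) / 8 := by
  have h2 := ha.AR2
  have hl := le_r8 n
  unfold Arena.Fits at hfit
  simp only [shadowSpan]
  omega

/-- The push of the return address followed by `setup_temp_malloc`'s footprint, as ONE footprint over the cut point's memory, every
window an `AllocWin` (`hsub`: `c11e_shadow_win`). -/
theorem c11e_call_same {g : Ghost} {A : Arena × List Obj} {m ms mr : Mem} {a : Word} {x sp f' p n : Nat} (hp : Pos g A)
    (hmem : ms = m.writeLE a 8 x) (ha : a.toNat + 8 = g.R) (hsp : sp + 8 = g.R) (hf : f' = g.f)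
    (hs : Mem.SameExcept [⟨sp - 80, sp⟩, ⟨f' + 132, f' + 136⟩, shadowSpan p (p + n)] ms mr)
    (hsub : 0xC00000 + A.1.B / 8 ≤ (shadowSpan p (p + n)).lo ∧
      (shadowSpan p (p + n)).hi ≤ 0xC00000 + (A.1.B + A.1.L + 7) / 8) :
    ∃ ws, Mem.SameExcept ws m mr ∧ ∀ w, w ∈ ws → AllocWin g A w := by
  have p1 := hp.r_eq
  have p2 := hp.ra_hi
  have p3 := hp.ra_lo
  refine ⟨[⟨g.R - 88, g.R⟩, ⟨g.f + 132, g.f + 136⟩, shadowSpan p (p + n)], ?_, ?_⟩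
  · refine Mem.SameExcept.trans (ν := ms) ?_ ?_
    · rw [hmem]
      apply Mem.SameExcept.writeLE
      · omega
      · refine ⟨_, List.mem_cons_self, ?_, ?_⟩
        · simp only []
          omega
        · simp only []
          omega
    · apply hs.mono
      intro w hw b h1 h2
      simp only [List.mem_cons, List.mem_nil_iff, or_false] at hw
      rcases hw with rfl | rfl | rfl
      · simp only [] at h1 h2
        exact ⟨_, List.mem_cons_self, by simp only []; omega, by simp only []; omega⟩
      · simp only [] at h1 h2
        exact ⟨_, List.mem_cons_of_mem _ List.mem_cons_self, by simp only []; omega, by simp only []; omega⟩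
      · exact ⟨_, List.mem_cons_of_mem _ (List.mem_cons_of_mem _ List.mem_cons_self), h1, h2⟩
  · intro w hw
    simp only [List.mem_cons, List.mem_nil_iff, or_false] at hw
    unfold AllocWin
    rcases hw with rfl | rfl | rfl
    · left
      simp only []
      omega
    · right
      right
      left
      simp only []
      omega
    · right
      right
      right
      exact hsub

/-- **A WHOLE `call setup_temp_malloc` THAT SUCCEEDS, in the walker's terms** (the twin of `Cur.alloc_call`): `v` = the cut point, `s` =
the state at the callee's entry (`hmem` = `w_mem_<addr>`), `sr` = the returned state; `hs` = `w_same` after `simp only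
[X86.User.Spec.footprint, vspec]`; `hpost` = `w_post`; `hfit`: the case `A.1.Fits n`. Gives `Frame` and CUR(i) at `sr` for the grown
ghost `(A.1.pushTemp n, A.1.newTempObj n :: A.2)`, `cb(i)` unmoved, every setup block kept, and rax = the new temp block. -/
theorem c11e_alloc_ok {u₀ : State} {g : Ghost} {pc pc' : Word} {i : Nat} {A2 A3 Ai : Arena} {A : Arena × List Obj}
    {v s sr : State} {a : Word} {x : Nat} (h : Frame u₀ g pc A v) (hc : Cur g i A2 A3 Ai A v)
    (hmem : s.mem = v.mem.writeLE a 8 x) (ha : a.toNat + 8 = g.R) (hsp : (s.reg .rsp).toNat + 8 = g.R)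
    (hrdi : (s.reg .rdi).toNat = g.f)
    (hs : Mem.SameExcept [⟨(s.reg .rsp).toNat - 80, (s.reg .rsp).toNat⟩,
      ⟨(s.reg .rdi).toNat + 132, (s.reg .rdi).toNat + 136⟩,
      shadowSpan (A.1.B + (A.1.T - (r8 ((s.reg .rsi).toNat % 2 ^ 32) + 32)))
        (A.1.B + (A.1.T - (r8 ((s.reg .rsi).toNat % 2 ^ 32) + 32)) + (s.reg .rsi).toNat % 2 ^ 32)] s.mem sr.mem)
    (hpost : (setup_temp_malloc.spec A.2 g.frames' A.1).post s sr) (hfit : A.1.Fits ((s.reg .rsi).toNat % 2 ^ 32))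
    (hrip : sr.rip = pc') (hrsp : sr.reg .rsp = v.reg .rsp) (hcode : CodeOK u₀ sr.mem) (hinv : abiInv sr)
    (hr14 : sr.reg .r14 = v.reg .r14) :
    Frame u₀ g pc' (A.1.pushTemp ((s.reg .rsi).toNat % 2 ^ 32), A.1.newTempObj ((s.reg .rsi).toNat % 2 ^ 32) :: A.2) sr ∧
      Cur g i A2 A3 Ai (A.1.pushTemp ((s.reg .rsi).toNat % 2 ^ 32), A.1.newTempObj ((s.reg .rsi).toNat % 2 ^ 32) :: A.2) sr ∧
      g.cb sr.mem i = g.cb v.mem i ∧ AllKept A.1.Blk v.mem sr.mem ∧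
      (sr.reg .rax).toNat = A.1.B + (A.1.T - (r8 ((s.reg .rsi).toNat % 2 ^ 32) + 32)) := by
  obtain ⟨hrax, ha', hsh'⟩ := hpost.1 hfit
  rw [hrdi] at ha'
  rw [hsp] at hsh'
  have hpos := Pos.of h hc
  obtain ⟨ws, hall, hok⟩ := c11e_call_same hpos hmem ha hsp hrdi hs (c11e_shadow_win hc.sd.arena hfit)
  have hext := A.1.extends_pushTemp ((s.reg .rsi).toNat % 2 ^ 32)
  have hand' : g.Hand (A.1.pushTemp ((s.reg .rsi).toNat % 2 ^ 32), A.1.newTempObj ((s.reg .rsi).toNat % 2 ^ 32) :: A.2) :=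
    HandOK.mono hc.hand hext (fun o ho => List.mem_cons_of_mem _ ho)
  have hx : BlkLive (listBlk g.extra)
      (g.Live (A.1.pushTemp ((s.reg .rsi).toNat % 2 ^ 32), A.1.newTempObj ((s.reg .rsi).toNat % 2 ^ 32) :: A.2)) := by
    have hl : BlkLive (listBlk g.extra) (g.Live A) := hc.sd.env.live.sub (fun B hB => runBlk_extra hB)
    refine hl.mono (fun x hx => ?_)
    obtain ⟨o, ho, hb⟩ := hx
    refine ⟨o, ?_, hb⟩
    rcases List.mem_append.mp ho with hst | hoth
    · exact List.mem_append_left _ hst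
    · exact List.mem_append_right _ (List.mem_cons_of_mem _ hoth)
  have hoff' : ∀ o, o ∈ A.1.newTempObj ((s.reg .rsi).toNat % 2 ^ 32) :: A.2 → L.textHi ≤ o.base := by
    intro o ho
    rcases List.mem_cons.mp ho with rfl | hold
    · have ht := hc.hand.arenaText
      show L.textHi ≤ A.1.B + (A.1.T - (r8 ((s.reg .rsi).toNat % 2 ^ 32) + 32))
      omega
    · exact h.offText o hold
  obtain ⟨r1, r2, r3, r4⟩ := Cur.free h hc hall hok hext ha' hsh' hand' hx hoff' hrip hrsp hcode hinv hr14
  exact ⟨r1, r2, r3, r4, hrax⟩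

/-- **A WHOLE `call setup_temp_malloc` THAT FAILS** (`¬ A.1.Fits n`: rax = 0, the arena and the shadow as they were, nothing written but
the callee's stack: the failure clause of the post): `Frame` and CUR(i) at the returned state for the SAME ghost. -/
theorem c11e_alloc_fail {u₀ : State} {g : Ghost} {pc pc' : Word} {i : Nat} {A2 A3 Ai : Arena} {A : Arena × List Obj}
    {v s sr : State} {a : Word} {x : Nat} (h : Frame u₀ g pc A v) (hc : Cur g i A2 A3 Ai A v)
    (hmem : s.mem = v.mem.writeLE a 8 x) (ha : a.toNat + 8 = g.R) (hsp : (s.reg .rsp).toNat + 8 = g.R)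
    (hrdi : (s.reg .rdi).toNat = g.f)
    (hpost : (setup_temp_malloc.spec A.2 g.frames' A.1).post s sr) (hfit : ¬ A.1.Fits ((s.reg .rsi).toNat % 2 ^ 32))
    (hrip : sr.rip = pc') (hrsp : sr.reg .rsp = v.reg .rsp) (hcode : CodeOK u₀ sr.mem) (hinv : abiInv sr)
    (hr14 : sr.reg .r14 = v.reg .r14) :
    Frame u₀ g pc' A sr ∧ Cur g i A2 A3 Ai A sr ∧ g.cb sr.mem i = g.cb v.mem i ∧ AllKept A.1.Blk v.mem sr.mem ∧
      sr.reg .rax = 0 := by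
  obtain ⟨hrax, ha', hun, hfailSame⟩ := hpost.2 hfit
  rw [hrdi] at ha'
  have hpos := Pos.of h hc
  have p1 := hpos.r_eq
  have p2 := hpos.ra_hi
  have p3 := hpos.ra_lo
  have hun0 : ShadowUntouched v.mem s.mem := by
    rw [hmem]
    exact Mem.eqOn_writeLE v.mem a 8 x 0xC00000 0x200000 (by omega) (by omega)
  have hunAll : ShadowUntouched v.mem sr.mem := Mem.EqOn.trans hun0 hun
  have hsh' : ShadowInv A.2 g.frames' g.R sr.mem := h.shadow.untouched hunAll
  have hx : BlkLive (listBlk g.extra) (g.Live A) := hc.sd.env.live.sub (fun B hB => runBlk_extra hB)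
  have hsame : Mem.SameExcept [⟨g.R - 88, g.R⟩] v.mem sr.mem := by
    refine Mem.SameExcept.trans (ν := s.mem) ?_ ?_
    · rw [hmem]
      apply Mem.SameExcept.writeLE
      · omega
      · refine ⟨_, List.mem_cons_self, ?_, ?_⟩
        · simp only []
          omega
        · simp only []
          omega
    · apply hfailSame.mono
      intro w hw b h1 h2
      rw [List.mem_singleton.mp hw] at h1 h2
      simp only [] at h1 h2
      exact ⟨_, List.mem_cons_self, by simp only []; omega, by simp only []; omega⟩
  have hok : ∀ w, w ∈ [(⟨g.R - 88, g.R⟩ : Span)] → AllocWin g A w := by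
    intro w hw
    rw [List.mem_singleton.mp hw]
    unfold AllocWin
    left
    simp only []
    omega
  obtain ⟨r1, r2, r3, r4⟩ := Cur.free h hc hsame hok (Arena.Extends.refl _) ha' hsh' hc.hand hx h.offText hrip hrsp hcode
    hinv hr14
  exact ⟨r1, r2, r3, r4, hrax⟩

/-- **The ghost of a successful `setup_temp_malloc(f, n)` with no temp block outstanding has exactly the new one** (from the head
start of C2b). -/
theorem c11e_temps {A : Arena} {n : Nat} {x : Word} (hno : A.temps = [])
    (hrax : x.toNat = A.B + (A.T - (r8 n + 32))) : TempsAre (A.pushTemp n) [(x.toNat, n)] := by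
  unfold TempsAre Arena.pushTemp
  simp only [hno, List.map_cons, List.map_nil, List.mem_cons, List.not_mem_nil, or_false]
  refine ⟨?_, ?_⟩
  · rw [hrax]
    congr 2
    omega
  · intro b hb
    rw [hb]
    simp only []
    omega

/-- **`In156` from the return of the allocator, pure part** (both arms): `Frame` and `Cur` at the returned state `w` for the ghost `A'`
(the grown one, or `A` itself), `cb(i)` unmoved, every setup block of `A` kept, `1 ≤ LV`, and the allocator's result. -/
theorem c11e_build156 {u₀ : State} {g : Ghost} {i : Nat} {A2 A3 Ai : Arena} {A A' : Arena × List Obj} {v w : State}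
    (h : In11V u₀ g i A2 A3 Ai A v) (hF : Frame u₀ g L.start_decoder.cut156 A' w) (hC : Cur g i A2 A3 Ai A' w)
    (hcb : g.cb w.mem i = g.cb v.mem i) (hkept : AllKept A.1.Blk v.mem w.mem) (hext : A.1.Extends A'.1)
    (hpos : 1 ≤ Codebook.lookup_values v.mem (g.cb v.mem i))
    (hres : w.reg .rax = 0 ∨ ((w.reg .rax).toNat ≠ 0 ∧
      TempsAre A'.1 [((w.reg .rax).toNat, 2 * Codebook.lookup_values v.mem (g.cb v.mem i))])) :
    In156 u₀ g i A2 A3 Ai A' w := by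
  have hcbOK := h.cur.ages.cbOK
  have hkI : AllKept Ai.Blk v.mem w.mem := fun B hB => hkept B (hB.mono h.cur.ages.exti)
  have hstruct : (Codebook.block (g.cb v.mem i)).Kept v.mem w.mem := hcbOK.cb_kept (hkI _ hcbOK.F2) i h.cur.lt
  have hsf := Codebook.SameFields.of_kept hstruct
  have hsv : 1 ≤ Codebook.sorted_entries v.mem (g.cb v.mem i) →
      (Codebook.svBlock v.mem (g.cb v.mem i)).Kept v.mem w.mem := fun hse => hkept _ (h.k.k4.sv hse).1
  have hk : K15 (Since Ai A.1) w.mem (g.cb v.mem i) := h.k.frame hstruct hsv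
  exact
    { frame := hF
      cur := hC
      k := by rw [hcb]; exact hk.mono (fun B hB => hB.mono hext)
      type_12 := by rw [hcb, hsf.lookup_type]; exact h.type_12
      prod_le := by rw [hcb, hsf.entries, hsf.dimensions]; exact h.prod_le
      mu0 := by rw [hcb, hsf.multiplicands]; exact h.mu0
      vb := by rw [hcb, hsf.value_bits]; exact h.vb
      type1_lv := by rw [hcb, hsf.lookup_type, hsf.lookup_values, hsf.entries]; exact h.type1_lv
      type2_lv := by rw [hcb, hsf.lookup_type, hsf.lookup_values, hsf.entries, hsf.dimensions]; exact h.type2_lv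
      lv_lt := by rw [hcb, hsf.lookup_values]; exact h.lv_lt
      lv_pos := by rw [hcb, hsf.lookup_values]; exact hpos
      res := by rw [hcb, hsf.lookup_values]; exact hres }

/-- **THE `AtERR` EXIT OF A STUB OF C11e** (`error(f, k)`, `jmp 0x113b22`): from `Frame`, CUR(i), K1 – K5 at a cut point `v`, ONE footprint
of quiet windows (`C11.QuietWin11`: the stack below `R`, the slot `q[R+28H]`, `error`'s `[f+140, f+144)`) from `v` to the exit state
`w`, no shadow byte written, and `rax = 0` (error's post): `C11.core11` + `Cur.failed`. -/
theorem c11e_err_exit {u₀ : State} {g : Ghost} {pc : Word} {i : Nat} {A2 A3 Ai : Arena} {A : Arena × List Obj} {v w : State}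
    {ws : List Span} (hfr : Frame u₀ g pc A v) (hcur : Cur g i A2 A3 Ai A v)
    (hk : K15 (Since Ai A.1) v.mem (g.cb v.mem i))
    (hs : Mem.SameExcept ws v.mem w.mem) (hun : ShadowUntouched v.mem w.mem)
    (hq : ∀ x, x ∈ ws → C11.QuietWin11 g (g.cb v.mem i) x)
    (hf : ∀ x, x ∈ ws → (g.R - 408 ≤ x.lo ∧ x.hi ≤ g.R + 0x598) ∨ (g.f + 72 ≤ x.lo ∧ x.hi ≤ g.f + 1488))
    (hrip : w.rip = pc_ERR) (hrsp : w.reg .rsp = v.reg .rsp) (hcode : CodeOK u₀ w.mem) (hinv : abiInv w)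
    (hr14 : w.reg .r14 = v.reg .r14) (hrax : w.reg .rax = 0) : AtERR u₀ g w := by
  have hpos : Pos g A := Pos.of hfr hcur
  have hb : Bits (g.Blk A) g.len w.mem g.f := by
    apply bits_kept hpos hcur.sd.bits hs
    intro x hx
    rcases hf x hx with k | k
    · exact Or.inl k
    · exact Or.inr (Or.inr (Or.inl k))
  obtain ⟨hF, hC, _, _, _, _, _⟩ := C11.core11 hfr hcur hk hs hun hq hb hrip hrsp hcode hinv hr14
  refine ⟨A, hF, hC.hand, Or.inl ⟨?_, hC.failed⟩⟩
  rw [hrax]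
  rfl

/-- **`lea esi,[rax+rax]` with `eax = LV < 2^30`**: the request of setup_temp_malloc is `2·LV`, no 32-bit wrap. -/
theorem c11e_two_lv (n : Nat) (h : n < 2 ^ 30) :
    (Word.ofBV (BitVec.setWidth 32 (Word.ofBV (BitVec.ofNat 32 n) + Word.ofBV (BitVec.ofNat 32 n)).toBitVec)).toNat % 2 ^ 32 =
      2 * n := by
  rw [cnt32_ofBV n (by omega), Vorbis.toNat_ofBV32, BitVec.toNat_setWidth, UInt64.toNat_toBitVec, UInt64.toNat_add,
    UInt64.toNat_ofNat']
  omega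

/-- **Segment C11e, first half** (0x114c6f … 0x114c8c and the stub 0x114d58): the checked load of `c->lookup_values`; `LV = 0`:
`error(f, 20)` and the epilogue (`c11e_err_exit`); else `setup_temp_malloc(f, 2·LV)` and `In156` at its return `cut156`
(`c11e_alloc_ok` / `c11e_alloc_fail`, `c11e_build156`). -/
theorem c11e_walk1 {Lay : Layout} (hLay : Lay.hi = 0x1000000) {μ : Microarch} (hμ : UserX.MicroOK μ) {u₀ : State}
    (hcode : HasCodeNat Lay u₀ Vorbis.L.start_decoder.entry Vorbis.Code.code_start_decoder.nat Vorbis.L.start_decoder.size)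
    (hld4 : Asan.SmallCheck Lay μ Vorbis.WayInv (Vorbis.CodeOK u₀) [.rax, .rcx, .rdx] 4 Vorbis.L.__asan_load4_noabort.entry)
    (hstm : ∀ (others : List Obj) (frames : List (Nat × FrameLayout)) (A : Arena), Calls Lay μ Vorbis.WayInv (Vorbis.conv u₀) Vorbis.L.setup_temp_malloc.entry (Vorbis.Spec.setup_temp_malloc.spec others frames A))
    (herror : ∀ (others : List Obj) (frames : List (Nat × FrameLayout)), Calls Lay μ Vorbis.WayInv (Vorbis.conv u₀) Vorbis.L.error.entry (Vorbis.Spec.error.spec others frames))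
    {g : Ghost} {i : Nat} {A2 A3 Ai : Arena} {A : Arena × List Obj} {v : State}
    (hat : In11V u₀ g i A2 A3 Ai A v) :
    ReachVia Lay μ WayInv v (fun w => At156 u₀ g i w ∨ AtERR u₀ g w) := by
  have hfr := hat.frame
  have he := hfr.entry
  v_entry he
  simp only [depth] at he_room he_stack
  have w_rip := hfr.rip
  obtain ⟨hr1, hr2⟩ := hfr.r_eq
  simp only [steady] at hr1
  have hRA : g.RA = (g.e.reg .rsp).toNat := rfl
  have c_rsp : v.reg .rsp = g.e.reg .rsp - 1480 := by
    rw [hfr.rsp]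
    refine (eq_addr _ _ ?_).symm
    unfold Ghost.R Ghost.RA steady
    u_omega
  -- the struct `c = cb(i)`: inside the codebooks block, a setup block of the arena
  have ha := hat.cur.sd.arena
  have hcb := hat.cur.ages.cbOK
  have hBA : A.1.Blk (codebooksBlock v.mem g.f) := hcb.F2.mono hat.cur.ages.exti
  have hcin := hcb.cb_in i hat.cur.lt
  have hboff := ha.block_off hBA
  have hbin := arena_inside ha hBA
  have hbnd := ha.bounds
  simp only [vblock, Off.sizeof.Codebook] at hcin hboff hbin
  have hcdef : stb_vorbis.codebooks_at v.mem g.f i = g.cb v.mem i := rfl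
  rw [hcdef] at hcin
  have hBA' : A.1.Block (stb_vorbis.codebooks v.mem g.f) (2120 * (stb_vorbis.codebook_count v.mem g.f).toNat) := hBA
  have e28 : v.reg .r14 + 28 = addr (g.cb v.mem i + 28) := by
    rw [hat.cur.r14]
    exact Vorbis.addr_add_lit _ 28
  have t28 : (v.reg .r14 + 28).toNat = g.cb v.mem i + 28 := by
    rw [e28]
    exact toNat_addr _ (by omega)
  have hlvlt := hat.lv_lt
  have hLV : v.mem.readLE (v.reg .r14 + 28) 4 = Codebook.lookup_values v.mem (g.cb v.mem i) := by
    rw [e28]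
    simp only [vacc, voff, Mem.u32]
  have hobr := hat.cur.sd.bits.OBR
  simp only [voff] at hobr
  have t1 : (g.e.reg .rsp - 1488).toNat = (g.e.reg .rsp).toNat - 1488 := by u_omega
  have sl_f : v.mem.readLE (g.e.reg .rsp - 1456) 8 = g.f := by
    have e : addr (g.R + 0x18) = g.e.reg .rsp - 1456 := by
      refine (eq_addr _ _ ?_).symm
      unfold Ghost.R Ghost.RA steady
      u_omega
    rw [← e]
    exact hat.cur.slot_f
  have hst := C4.obj_stack hfr hat.cur.hand
  have hfn : (UInt64.ofNat g.f).toNat = g.f := toNat_addr g.f (by omega)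
  have w_eq : Mem.EqOn Vorbis.L.textLo Vorbis.L.textHi u₀.mem v.mem := hfr.code
  have hdf : v.flags .df = false := (show abiInv _ from hfr.inv).1
  have hmx : v.mxcsr &&& 0x1F80 = 0x1F80 := (show abiInv _ from hfr.inv).2
  have hsse := Vorbis.sseOK_of_abiInv hfr.inv
  have hstm' := hstm A.2 g.frames' A.1
  have herr' := herror A.2 g.frames'
  u_walk hcode [hμ.vendor] until [Vorbis.L.start_decoder.cut156, Vorbis.L.start_decoder.cut4] span [Vorbis.L.textLo, Vorbis.L.textHi] side (v_side)
  case check_114c73 =>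
    -- 0x114c73: the load of `c->lookup_values`, inside the codebooks block
    have hun : ShadowUntouched v.mem s_114c73.mem := by v_untouched
    have hsh' := hfr.shadow.untouched hun
    refine ⟨hsh'.sealed, ?_⟩
    rw [t28]
    exact ha.block_acc_inv hsh' hBA' (by omega) (by omega) (by decide)
  case call_inv => v_inv
  case pre_114d65 =>
    -- 0x114d65: `error(f, VORBIS_invalid_setup)`
    have hun : ShadowUntouched v.mem s_114d65.mem := by v_untouched
    apply c11e_error_pre hfr hat.cur.hand hun
    · rw [w_rsp, t1]
      omega
    · rw [w_rdi]
      exact hfn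
  case call_inv => v_inv
  case pre_114c8c =>
    -- 0x114c8c: `setup_temp_malloc(f, 2·LV)`
    have hun : ShadowUntouched v.mem s_114c8c.mem := by v_untouched
    apply c11e_temp_pre hfr hat.cur hun
    · rw [w_mem]
      exact Mem.eqOn_writeLE v.mem _ 8 _ (g.f + 112) 24 (by rw [t1]; omega) (by rw [t1]; omega)
    · rw [w_rsp, t1]
      omega
    · rw [w_rdi]
      exact hfn
  case cont =>
    -- `error(f, VORBIS_invalid_setup)` returned (0x114d6a): `jmp 0x113b22`, the epilogue
    v_after_call w_rsp_114d65 w_mem_114d65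
    have hf : (s_114d65.reg .rdi).toNat = g.f := by
      rw [w_rdi_114d65]
      exact hfn
    simp only [hf, t1] at w_same
    have hp : s_114d65r.reg .rax = 0 ∧ ShadowUntouched s_114d65.mem s_114d65r.mem ∧
        s_114d65r.mem.readLE (s_114d65.reg .rdi + 140) 4 = (s_114d65.reg .rsi).toNat % 2 ^ 32 := w_post
    have w_rax : s_114d65r.reg .rax = 0 := hp.1
    u_walk hcode [hμ.vendor] until [Vorbis.L.start_decoder.cut156, Vorbis.L.start_decoder.cut4] span [Vorbis.L.textLo, Vorbis.L.textHi] side (v_side)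
    have hpush : Mem.SameExcept [⟨g.R - 408, g.R⟩] v.mem (v.mem.writeLE (g.e.reg .rsp - 1488) 8 1133930) := by
      refine Mem.SameExcept.writeLE _ v.mem _ 8 _ ?_ ⟨⟨g.R - 408, g.R⟩, List.mem_cons_self, ?_, ?_⟩
      · rw [t1]
        omega
      · rw [t1]
        show g.R - 408 ≤ _
        omega
      · rw [t1]
        show _ ≤ g.R
        omega
    -- the push and `error`'s footprint as one footprint over the cut point's memory
    have hall : Mem.SameExcept [⟨g.R - 408, g.R⟩, ⟨g.f + 140, g.f + 144⟩] v.mem s_114d6a.mem := by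
      rw [w_mem]
      refine Mem.SameExcept.trans (ν := v.mem.writeLE (g.e.reg .rsp - 1488) 8 1133930) ?_ ?_
      · apply hpush.mono
        intro w hw a h1 h2
        rw [List.mem_singleton.mp hw] at h1 h2
        exact ⟨_, List.mem_cons_self, h1, h2⟩
      · apply w_same.mono
        intro w hw a h1 h2
        simp only [List.mem_cons, List.mem_nil_iff, or_false] at hw
        rcases hw with rfl | rfl
        · simp only [] at h1 h2
          exact ⟨_, List.mem_cons_self, by simp only []; omega, by simp only []; omega⟩
        · exact ⟨_, List.mem_cons_of_mem _ List.mem_cons_self, h1, h2⟩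
    have hq : ∀ x, x ∈ [(⟨g.R - 408, g.R⟩ : Span), ⟨g.f + 140, g.f + 144⟩] →
        C11.QuietWin11 g (g.cb v.mem i) x := by
      intro x hx
      simp only [List.mem_cons, List.mem_nil_iff, or_false] at hx
      unfold C11.QuietWin11
      rcases hx with rfl | rfl
      · left
        exact ⟨Nat.le_refl _, Nat.le_refl _⟩
      · right; right; right; right; right; right; left
        simp only []
        omega
    have hfw : ∀ x, x ∈ [(⟨g.R - 408, g.R⟩ : Span), ⟨g.f + 140, g.f + 144⟩] →
        (g.R - 408 ≤ x.lo ∧ x.hi ≤ g.R + 0x598) ∨ (g.f + 72 ≤ x.lo ∧ x.hi ≤ g.f + 1488) := by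
      intro x hx
      simp only [List.mem_cons, List.mem_nil_iff, or_false] at hx
      rcases hx with rfl | rfl
      · left
        simp only []
        omega
      · right
        simp only []
        omega
    have hun0 : ShadowUntouched v.mem s_114d65.mem := by
      rw [w_mem_114d65]
      apply hpush.eqOn
      intro w hw
      rw [List.mem_singleton.mp hw]
      simp only []
      omega
    have hunAll : ShadowUntouched v.mem s_114d6a.mem := by
      rw [w_mem]
      exact Mem.EqOn.trans hun0 hp.2.1
    have habi : abiInv s_114d6a := by
      refine Vorbis.abiInv_of ?_ ?_
      · rw [w_flags]
        exact w_df
      · rw [w_mxcsr]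
        exact w_mx
    have hrsp : s_114d6a.reg .rsp = v.reg .rsp := by
      rw [w_rsp, c_rsp]
    exact ReachVia.done (Or.inr (c11e_err_exit hfr hat.cur hat.k hall hunAll hq hfw w_rip hrsp w_eq habi
      (w_kept .r14 rfl) w_rax))
  case cont =>
    -- 0x114c91 = `cut156`: setup_temp_malloc(f, 2·LV) returned
    have hpos1 : 1 ≤ Codebook.lookup_values v.mem (g.cb v.mem i) := by omega
    have ersi : (s_114c8c.reg .rsi).toNat % 2 ^ 32 = 2 * Codebook.lookup_values v.mem (g.cb v.mem i) := by
      rw [w_rsi_114c8c]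
      exact c11e_two_lv _ hlvlt
    simp only [X86.User.Spec.footprint, vspec] at w_same
    have e_sp : (s_114c8c.reg .rsp).toNat + 8 = g.R := by
      rw [w_rsp_114c8c, t1]
      omega
    have e_a : (g.e.reg .rsp - 1488).toNat + 8 = g.R := by
      rw [t1]
      omega
    have e_rdi : (s_114c8c.reg .rdi).toNat = g.f := by
      rw [w_rdi_114c8c]
      exact hfn
    have hrsp : s_114c8cr.reg .rsp = v.reg .rsp := by
      rw [w_rsp, c_rsp]
    have htx := hat.cur.hand.arenaText
    simp only [Vorbis.L.textHi] at htx
    by_cases hfit : A.1.Fits ((s_114c8c.reg .rsi).toNat % 2 ^ 32)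
    · -- the request fits: the ghost arena grows by the temp block P4 = (mults, 2·LV)
      obtain ⟨r1, r2, r3, r4, r5⟩ := c11e_alloc_ok hfr hat.cur w_mem_114c8c e_a e_sp e_rdi w_same w_post hfit w_rip hrsp
        (Vorbis.conv_code_eqOn w_code) w_inv (w_kept.get .r14 rfl)
      apply ReachVia.done
      refine Or.inl ⟨_, A2, A3, Ai, c11e_build156 hat r1 r2 r3 r4 (A.1.extends_pushTemp _) hpos1 (Or.inr ⟨?_, ?_⟩)⟩
      · rw [r5]
        omega
      · have ht := c11e_temps (x := s_114c8cr.reg .rax) hat.noTemps r5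
        rw [ersi] at ht ⊢
        exact ht
    · -- the request does not fit: rax = 0, the same ghost
      obtain ⟨r1, r2, r3, r4, r5⟩ := c11e_alloc_fail hfr hat.cur w_mem_114c8c e_a e_sp e_rdi w_post hfit w_rip hrsp
        (Vorbis.conv_code_eqOn w_code) w_inv (w_kept.get .r14 rfl)
      apply ReachVia.done
      exact Or.inl ⟨A, A2, A3, Ai, c11e_build156 hat r1 r2 r3 r4 (Arena.Extends.refl _) hpos1 (Or.inl r5)⟩

/-- **The fields `value_bits`, `lookup_type`, `lookup_values` of the struct at `c` over a footprint that misses `[c + 16, c + 32)`**. -/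
theorem c11e_fields_off {m m' : Mem} {c : Nat} {ws : List Span} (hs : Mem.SameExcept ws m m') (hc : c + 32 ≤ 2 ^ 64)
    (hw : ∀ x, x ∈ ws → x.hi ≤ c + 16 ∨ c + 32 ≤ x.lo) :
    Codebook.value_bits m' c = Codebook.value_bits m c ∧ Codebook.lookup_type m' c = Codebook.lookup_type m c ∧
      Codebook.lookup_values m' c = Codebook.lookup_values m c := by
  have hk : (Block.mk (c + 16) 16).Kept m m' := by
    apply Block.Kept.of_sameExcept hs _ (by simp only []; omega)
    intro x hx
    have k := hw x hx
    simp only []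
    omega
  refine ⟨?_, ?_, ?_⟩
  · simp only [vacc, voff]
    exact hk.u8 _ (by simp only []; omega) (by simp only []; omega)
  · simp only [vacc, voff]
    exact hk.u8 _ (by simp only []; omega) (by simp only []; omega)
  · simp only [vacc, voff]
    exact hk.u32 _ (by simp only []; omega) (by simp only []; omega)

/-- **The same at a cut point of the codebook loop**, for a footprint of windows in the own stack frame `[R − 408, R + 598H)` or
inside `*f` (`[f + 72, f + 1488)`): the struct `cb(i)` lies in the arena's buffer, off the stack region, and `*f` lies outside the
buffer. WHEN: both exits of the second half of C11e (the spill of `mults`, the push, `error`'s store). -/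
theorem c11e_fields_quiet {u₀ : State} {g : Ghost} {pc : Word} {i : Nat} {A2 A3 Ai : Arena} {A : Arena × List Obj} {v : State}
    {m' : Mem} {ws : List Span} (hfr : Frame u₀ g pc A v) (hcur : Cur g i A2 A3 Ai A v)
    (hs : Mem.SameExcept ws v.mem m')
    (hw : ∀ x, x ∈ ws → (g.R - 408 ≤ x.lo ∧ x.hi ≤ g.R + 0x598) ∨ (g.f + 72 ≤ x.lo ∧ x.hi ≤ g.f + 1488)) :
    Codebook.value_bits m' (g.cb v.mem i) = Codebook.value_bits v.mem (g.cb v.mem i) ∧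
      Codebook.lookup_type m' (g.cb v.mem i) = Codebook.lookup_type v.mem (g.cb v.mem i) ∧
      Codebook.lookup_values m' (g.cb v.mem i) = Codebook.lookup_values v.mem (g.cb v.mem i) := by
  have hpos : Pos g A := Pos.of hfr hcur
  have hm0 : MInv g i A2 A3 Ai A v.mem := MInv.of hfr hcur
  have hcw := hm0.c_where
  obtain ⟨p1, p2, p3, p4, p5, p6, p7, p8, p9, p10, p11, p12, p13, p14⟩ := hpos
  apply c11e_fields_off hs (by omega)
  intro x hx
  have k := hw x hx
  omega

/-- **Segment C11e, second half** (0x114c91 … 0x114c9f and the stub 0x114d6f): the spill `q[R+28H] = rax` (before the NULL test);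
`rax = 0`: `error(f, 3)` and the epilogue (`c11e_err_exit`: the spill, the push, `error`'s store are quiet windows); else
`ebp = d[R+24H] = 0` (Z24) and `In11L` at the head `loop11` of loop 3892 with `j = 0`, `n = LV`, `mults = rax` (`C11.core11` over
the one spill window). -/
theorem c11e_walk2 {Lay : Layout} (hLay : Lay.hi = 0x1000000) {μ : Microarch} (hμ : UserX.MicroOK μ) {u₀ : State}
    (hcode : HasCodeNat Lay u₀ Vorbis.L.start_decoder.entry Vorbis.Code.code_start_decoder.nat Vorbis.L.start_decoder.size)
    (herror : ∀ (others : List Obj) (frames : List (Nat × FrameLayout)), Calls Lay μ Vorbis.WayInv (Vorbis.conv u₀) Vorbis.L.error.entry (Vorbis.Spec.error.spec others frames))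
    {g : Ghost} {i : Nat} {A2 A3 Ai : Arena} {A : Arena × List Obj} {v : State}
    (hat : In156 u₀ g i A2 A3 Ai A v) :
    ReachVia Lay μ WayInv v (fun w => (∃ n, At11L u₀ g i n 0 Vorbis.L.start_decoder.loop11 w) ∨ AtERR u₀ g w) := by
  have hfr := hat.frame
  have he := hfr.entry
  v_entry he
  simp only [depth] at he_room he_stack
  have w_rip := hfr.rip
  obtain ⟨hr1, hr2⟩ := hfr.r_eq
  simp only [steady] at hr1
  have hRA : g.RA = (g.e.reg .rsp).toNat := rfl
  have c_rsp : v.reg .rsp = g.e.reg .rsp - 1480 := by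
    rw [hfr.rsp]
    refine (eq_addr _ _ ?_).symm
    unfold Ghost.R Ghost.RA steady
    u_omega
  have hobr := hat.cur.sd.bits.OBR
  simp only [voff] at hobr
  have t1 : (g.e.reg .rsp - 1488).toNat = (g.e.reg .rsp).toNat - 1488 := by u_omega
  have t2 : (g.e.reg .rsp - 1440).toNat = (g.e.reg .rsp).toNat - 1440 := by u_omega
  have sl_f : v.mem.readLE (g.e.reg .rsp - 1456) 8 = g.f := by
    have e : addr (g.R + 0x18) = g.e.reg .rsp - 1456 := by
      refine (eq_addr _ _ ?_).symm
      unfold Ghost.R Ghost.RA steady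
      u_omega
    rw [← e]
    exact hat.cur.slot_f
  have sl_z : v.mem.readLE (g.e.reg .rsp - 1444) 4 = 0 := by
    have e : addr (g.R + 0x24) = g.e.reg .rsp - 1444 := by
      refine (eq_addr _ _ ?_).symm
      unfold Ghost.R Ghost.RA steady
      u_omega
    rw [← e]
    exact hat.cur.sd.frame.z24 (by omega) (by omega)
  have hst := C4.obj_stack hfr hat.cur.hand
  have hfn : (UInt64.ofNat g.f).toNat = g.f := toNat_addr g.f (by omega)
  have w_eq : Mem.EqOn Vorbis.L.textLo Vorbis.L.textHi u₀.mem v.mem := hfr.code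
  have hdf : v.flags .df = false := (show abiInv _ from hfr.inv).1
  have hmx : v.mxcsr &&& 0x1F80 = 0x1F80 := (show abiInv _ from hfr.inv).2
  have hsse := Vorbis.sseOK_of_abiInv hfr.inv
  have herr' := herror A.2 g.frames'
  u_walk hcode [hμ.vendor] until [Vorbis.L.start_decoder.loop11, Vorbis.L.start_decoder.cut4] span [Vorbis.L.textLo, Vorbis.L.textHi] side (v_side)
  case call_inv => v_inv
  case pre_114d7c =>
    -- 0x114d7c: `error(f, VORBIS_outofmem)`
    have hun : ShadowUntouched v.mem s_114d7c.mem := by v_untouched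
    apply c11e_error_pre hfr hat.cur.hand hun
    · rw [w_rsp, t1]
      omega
    · rw [w_rdi]
      exact hfn
  case cont =>
    -- `error(f, VORBIS_outofmem)` returned (0x114d81): `jmp 0x113b22`, the epilogue
    v_after_call w_rsp_114d7c w_mem_114d7c
    have hf : (s_114d7c.reg .rdi).toNat = g.f := by
      rw [w_rdi_114d7c]
      exact hfn
    simp only [hf, t1] at w_same
    have hp : s_114d7cr.reg .rax = 0 ∧ ShadowUntouched s_114d7c.mem s_114d7cr.mem ∧
        s_114d7cr.mem.readLE (s_114d7c.reg .rdi + 140) 4 = (s_114d7c.reg .rsi).toNat % 2 ^ 32 := w_post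
    have w_rax : s_114d7cr.reg .rax = 0 := hp.1
    u_walk hcode [hμ.vendor] until [Vorbis.L.start_decoder.loop11, Vorbis.L.start_decoder.cut4] span [Vorbis.L.textLo, Vorbis.L.textHi] side (v_side)
    -- the spill of `mults` and the pushed return address
    have hpush : Mem.SameExcept [⟨g.R - 408, g.R⟩, ⟨g.R + 0x28, g.R + 0x30⟩] v.mem
        ((v.mem.writeLE (g.e.reg .rsp - 1440) 8 (v.reg .rax).toNat).writeLE (g.e.reg .rsp - 1488) 8 1133953) := by
      refine Mem.SameExcept.step_writeLE _ 8 _ (Mem.SameExcept.writeLE _ v.mem _ 8 _ ?_ ?_) ?_ ?_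
      · rw [t2]
        omega
      · refine ⟨⟨g.R + 0x28, g.R + 0x30⟩, List.mem_cons_of_mem _ List.mem_cons_self, ?_, ?_⟩
        · rw [t2]
          show g.R + 0x28 ≤ _
          omega
        · rw [t2]
          show _ ≤ g.R + 0x30
          omega
      · rw [t1]
        omega
      · refine ⟨⟨g.R - 408, g.R⟩, List.mem_cons_self, ?_, ?_⟩
        · rw [t1]
          show g.R - 408 ≤ _
          omega
        · rw [t1]
          show _ ≤ g.R
          omega
    -- … and `error`'s footprint, as one footprint over the cut point's memory
    have hall : Mem.SameExcept [⟨g.R - 408, g.R⟩, ⟨g.R + 0x28, g.R + 0x30⟩, ⟨g.f + 140, g.f + 144⟩] v.mem s_114d81.mem := by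
      rw [w_mem]
      refine Mem.SameExcept.trans (ν := (v.mem.writeLE (g.e.reg .rsp - 1440) 8 (v.reg .rax).toNat).writeLE
        (g.e.reg .rsp - 1488) 8 1133953) ?_ ?_
      · apply hpush.mono
        intro w hw a h1 h2
        simp only [List.mem_cons, List.mem_nil_iff, or_false] at hw
        rcases hw with rfl | rfl
        · exact ⟨_, List.mem_cons_self, h1, h2⟩
        · exact ⟨_, List.mem_cons_of_mem _ List.mem_cons_self, h1, h2⟩
      · apply w_same.mono
        intro w hw a h1 h2
        simp only [List.mem_cons, List.mem_nil_iff, or_false] at hw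
        rcases hw with rfl | rfl
        · simp only [] at h1 h2
          exact ⟨_, List.mem_cons_self, by simp only []; omega, by simp only []; omega⟩
        · exact ⟨_, List.mem_cons_of_mem _ (List.mem_cons_of_mem _ List.mem_cons_self), h1, h2⟩
    have hq : ∀ x, x ∈ [(⟨g.R - 408, g.R⟩ : Span), ⟨g.R + 0x28, g.R + 0x30⟩, ⟨g.f + 140, g.f + 144⟩] →
        C11.QuietWin11 g (g.cb v.mem i) x := by
      intro x hx
      simp only [List.mem_cons, List.mem_nil_iff, or_false] at hx
      unfold C11.QuietWin11
      rcases hx with rfl | rfl | rfl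
      · left
        exact ⟨Nat.le_refl _, Nat.le_refl _⟩
      · right; left
        exact ⟨Nat.le_refl _, Nat.le_refl _⟩
      · right; right; right; right; right; right; left
        simp only []
        omega
    have hfw : ∀ x, x ∈ [(⟨g.R - 408, g.R⟩ : Span), ⟨g.R + 0x28, g.R + 0x30⟩, ⟨g.f + 140, g.f + 144⟩] →
        (g.R - 408 ≤ x.lo ∧ x.hi ≤ g.R + 0x598) ∨ (g.f + 72 ≤ x.lo ∧ x.hi ≤ g.f + 1488) := by
      intro x hx
      simp only [List.mem_cons, List.mem_nil_iff, or_false] at hx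
      rcases hx with rfl | rfl | rfl
      · left
        simp only []
        omega
      · left
        simp only []
        omega
      · right
        simp only []
        omega
    have hun0 : ShadowUntouched v.mem s_114d7c.mem := by
      rw [w_mem_114d7c]
      apply hpush.eqOn
      intro w hw
      simp only [List.mem_cons, List.mem_nil_iff, or_false] at hw
      rcases hw with rfl | rfl
      · simp only []
        omega
      · simp only []
        omega
    have hunAll : ShadowUntouched v.mem s_114d81.mem := by
      rw [w_mem]
      exact Mem.EqOn.trans hun0 hp.2.1
    have habi : abiInv s_114d81 := by
      refine Vorbis.abiInv_of ?_ ?_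
      · rw [w_flags]
        exact w_df
      · rw [w_mxcsr]
        exact w_mx
    have hrsp : s_114d81.reg .rsp = v.reg .rsp := by
      rw [w_rsp, c_rsp]
    exact ReachVia.done (Or.inr (c11e_err_exit hfr hat.cur hat.k hall hunAll hq hfw w_rip hrsp w_eq habi
      (w_kept .r14 rfl) w_rax))
  case cont =>
    -- 0x114ca3 = `loop11`: `mults ≠ NULL`, `j = 0`
    have hspill : Mem.SameExcept [⟨g.R + 0x28, g.R + 0x30⟩] v.mem s_114c9f.mem := by
      rw [w_mem]
      refine Mem.SameExcept.writeLE _ v.mem _ 8 _ ?_ ⟨⟨g.R + 0x28, g.R + 0x30⟩, List.mem_cons_self, ?_, ?_⟩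
      · rw [t2]
        omega
      · rw [t2]
        show g.R + 0x28 ≤ _
        omega
      · rw [t2]
        show _ ≤ g.R + 0x30
        omega
    have hq : ∀ x, x ∈ [(⟨g.R + 0x28, g.R + 0x30⟩ : Span)] → C11.QuietWin11 g (g.cb v.mem i) x := by
      intro x hx
      rw [List.mem_singleton.mp hx]
      unfold C11.QuietWin11
      right; left
      exact ⟨Nat.le_refl _, Nat.le_refl _⟩
    have hfw : ∀ x, x ∈ [(⟨g.R + 0x28, g.R + 0x30⟩ : Span)] →
        (g.R - 408 ≤ x.lo ∧ x.hi ≤ g.R + 0x598) ∨ (g.f + 72 ≤ x.lo ∧ x.hi ≤ g.f + 1488) := by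
      intro x hx
      rw [List.mem_singleton.mp hx]
      left
      simp only []
      omega
    have hun : ShadowUntouched v.mem s_114c9f.mem := by v_untouched
    have hpos : Pos g A := Pos.of hfr hat.cur
    have hb : Bits (g.Blk A) g.len s_114c9f.mem g.f := by
      apply bits_kept hpos hat.cur.sd.bits hspill
      intro x hx
      exact Or.inl ((hfw x hx).resolve_right (by
        rw [List.mem_singleton.mp hx]
        simp only []
        omega))
    have habi : abiInv s_114c9f := by
      refine Vorbis.abiInv_of ?_ ?_
      · rw [w_flags]
        simp only [X86.User.df_setStatus]
        exact hdf
      · rw [w_mxcsr]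
        exact hmx
    have hrsp : s_114c9f.reg .rsp = v.reg .rsp := w_kept .rsp rfl
    obtain ⟨hF, hC, hcbeq, hk15, e_dim, e_ent, e_mu⟩ := C11.core11 hfr hat.cur hat.k hspill hun hq hb w_rip hrsp w_eq habi
      (w_kept .r14 rfl)
    obtain ⟨e_vb, e_lt, e_lv⟩ := c11e_fields_quiet hfr hat.cur hspill hfw
    -- the result of setup_temp_malloc is not NULL: the temp block P4 = (mults, 2·LV)
    have htemps := (hat.res.resolve_left (fun h0 => hbr_114c99 (by rw [h0]; rfl))).2
    have eslot : addr (g.R + 0x28) = g.e.reg .rsp - 1440 := by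
      refine (eq_addr _ _ ?_).symm
      unfold Ghost.R Ghost.RA steady
      u_omega
    have hslot : s_114c9f.mem.u64 (g.R + 0x28) = (v.reg .rax).toNat := by
      rw [w_mem, ← eslot, Mem.u64_writeLE_same]
      have := (v.reg .rax).toNat_lt
      omega
    refine ReachVia.done (Or.inl ⟨Codebook.lookup_values v.mem (g.cb v.mem i), A, (v.reg .rax).toNat, A2, A3, Ai, ?_⟩)
    exact
      { frame := hF
        cur := hC
        k := by rw [hcbeq]; exact hk15
        type_12 := by rw [hcbeq, e_lt]; exact hat.type_12
        prod_le := by rw [hcbeq, e_ent, e_dim]; exact hat.prod_le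
        mults :=
          { slot := hslot
            temps := by rw [hcbeq, e_lv]; exact htemps
            lv_pos := by rw [hcbeq, e_lv]; exact hat.lv_pos
            lv_lt := by rw [hcbeq, e_lv]; exact hat.lv_lt }
        type1_lv := by rw [hcbeq, e_lt, e_lv, e_ent]; exact hat.type1_lv
        type2_lv := by rw [hcbeq, e_lt, e_lv, e_ent, e_dim]; exact hat.type2_lv
        vb := by rw [hcbeq, e_vb]; exact hat.vb
        mu0 := by rw [hcbeq, e_mu]; exact hat.mu0
        rbp := by rw [w_rbp]; rfl
        j_le := Nat.zero_le _
        lv_eq := by rw [hcbeq, e_lv] }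

end Vorbis.Spec.start_decoder_C11e
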